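-- pv_equiv track=rewrite | github.com/dsbulgakovv/offline_labeler | src/labeler/io_utils.py | _safe_name_fragment
-- ===== SOURCE A (Python) =====
-- def _safe_name_fragment(value):
--     text = str(value or '').strip()
--     if not text:
--         return 'mode'
--     allowed = []
--     for ch in text:
--         if ch.isalnum() or ch in ('-', '_'):
--             allowed.append(ch)
--         else:
--             allowed.append('_')
--     compact = ''.join(allowed)
--     while '__' in compact:
--         compact = compact.replace('__', '_')
--     return compact.strip('_') or 'mode'
-- ===== SOURCE B (Python) =====
-- def _safe_name_fragment(value):
--     text = str(value or '').strip()
--     if not text: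
--         return 'mode'
--     out = []
--     for ch in text:
--         mapped = ch if (ch.isalnum() or ch in ('-', '_')) else '_'
--         if not (mapped == '_' and out and out[-1] == '_'):
--             out.append(mapped)
--     return ''.join(out).strip('_') or 'mode'
-- ===== Notes on version B (the rewrite author's own statement) =====
-- stated objective: simpler
-- what changed: A builds the mapped string and then repeatedly scans and replaces double underscores until a fixpoint; B makes a single pass over the text that never appends an underscore directly after another, so the whole collapse loop disappears.
import Mathlib
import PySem

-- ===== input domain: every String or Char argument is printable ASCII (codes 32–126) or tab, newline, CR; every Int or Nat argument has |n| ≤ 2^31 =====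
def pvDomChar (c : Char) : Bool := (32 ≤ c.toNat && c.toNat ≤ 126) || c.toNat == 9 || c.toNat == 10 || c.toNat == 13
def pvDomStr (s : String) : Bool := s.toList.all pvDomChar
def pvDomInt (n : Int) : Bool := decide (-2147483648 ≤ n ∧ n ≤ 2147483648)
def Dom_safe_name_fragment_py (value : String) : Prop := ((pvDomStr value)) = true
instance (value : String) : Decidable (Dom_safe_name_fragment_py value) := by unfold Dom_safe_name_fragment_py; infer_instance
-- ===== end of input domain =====

-- B replaces A's build-then-repeatedly-collapse ('while "__" in compact: … replace') by a single
-- pass that never lets an underscore run form (objective: simpler decomposition, same result).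

-- ===== PORT A =====

-- shared character mapping: ch if ch.isalnum() or ch in ('-','_') else '_'
def pvMapped (ch : Char) : Char :=
  if PySem.Chars.isalnum ch || ch = '-' || ch = '_' then ch else '_'

-- one round of compact.replace('__', '_'): non-overlapping, left to right
def pvRep : List Char → List Char
  | [] => []
  | [c] => [c]
  | a :: b :: rest =>
    if a = '_' ∧ b = '_' then '_' :: pvRep rest else a :: pvRep (b :: rest)

theorem pvRep_length_le (l : List Char) : (pvRep l).length ≤ l.length := by
  fun_induction pvRep l with
  | case1 => simp
  | case2 c => simp
  | case3 a b rest h ih => simp only [List.length_cons]; omega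
  | case4 a b rest h ih => simp only [List.length_cons] at ih ⊢; omega

theorem pvRep_length_lt (l : List Char) (h : ['_','_'] <:+: l) :
    (pvRep l).length < l.length := by
  fun_induction pvRep l with
  | case1 => simp at h
  | case2 c => have := h.length_le; simp at this
  | case3 a b rest hc ih =>
      have := pvRep_length_le rest
      simp only [List.length_cons]; omega
  | case4 a b rest hc ih =>
      have h' : ['_','_'] <:+: (b :: rest) := by
        obtain ⟨pre, suf, hps⟩ := h
        cases pre with
        | nil =>
          simp only [List.nil_append, List.cons_append, List.cons.injEq] at hps
          exact absurd ⟨hps.1.symm, hps.2.1.symm⟩ hc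
        | cons x pre' =>
          simp only [List.cons_append, List.cons.injEq] at hps
          exact ⟨pre', suf, hps.2⟩
      have := ih h'
      simp only [List.length_cons] at this ⊢; omega

-- the Python loop: while '__' in compact: compact = compact.replace('__','_')
def pvCollapse (l : List Char) : List Char :=
  if h : PySem.Chars.isIn ['_','_'] l = true then pvCollapse (pvRep l) else l
termination_by l.length
decreasing_by exact pvRep_length_lt l ((PySem.Chars.isIn_iff_infix _ _).mp h)

def safe_name_fragment_py (value : String) : String :=
  -- text = str(value or '').strip(); on a str argument, str(value or '') = value
  let text := PySem.Str.strip (if value = "" then "" else value)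
  if text = "" then "mode"
  else
    let allowed := text.toList.foldl (fun acc ch => acc ++ [pvMapped ch]) []
    let compact := pvCollapse allowed
    let r := PySem.Chars.stripChars compact ['_']
    if r = [] then "mode" else String.ofList r

-- ===== PORT B =====

-- single pass; the flag records whether the last appended char is '_'
def pvBuild : List Char → Bool → List Char
  | [], _ => []
  | ch :: rest, lastU =>
    let mapped := pvMapped ch
    if mapped = '_' && lastU then pvBuild rest lastU
    else mapped :: pvBuild rest (mapped = '_')

def safe_name_fragment_py_alt (value : String) : String :=
  let text := PySem.Str.strip (if value = "" then "" else value)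
  if text = "" then "mode"
  else
    let r := PySem.Chars.stripChars (pvBuild text.toList false) ['_']
    if r = [] then "mode" else String.ofList r

-- ===== PRECONDITION & SPEC =====
def Spec_safe_name_fragment_py (value : String) (out : String) : Prop := out = safe_name_fragment_py_alt value
instance (value : String) (out : String) : Decidable (Spec_safe_name_fragment_py value out) := by unfold Spec_safe_name_fragment_py; infer_instance

-- ===== CLAIM (what is proved, stated in full; the proofs are below) =====
def Claim_equal_safe_name_fragment_py : Prop := ∀ (value : String), Dom_safe_name_fragment_py value → Spec_safe_name_fragment_py value (safe_name_fragment_py value)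

-- ===== LEMMAS AND PROOFS =====

-- canonical form: collapse every maximal run of '_' to a single '_'
def pvSqueeze : List Char → List Char
  | [] => []
  | [c] => [c]
  | a :: b :: rest =>
    if a = '_' ∧ b = '_' then pvSqueeze (b :: rest) else a :: pvSqueeze (b :: rest)

theorem pvSqueeze_cons (c : Char) (l : List Char) :
    pvSqueeze (c :: l) =
      if c = '_' ∧ l.head? = some '_' then pvSqueeze l else c :: pvSqueeze l := by
  cases l with
  | nil => simp [pvSqueeze]
  | cons b rest => simp [pvSqueeze]

theorem pvRep_head? (l : List Char) : (pvRep l).head? = l.head? := by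
  fun_induction pvRep l with
  | case1 => rfl
  | case2 c => rfl
  | case3 a b rest h ih => simp [h.1]
  | case4 a b rest h ih => simp

theorem pvSqueeze_rep (l : List Char) : pvSqueeze (pvRep l) = pvSqueeze l := by
  fun_induction pvRep l with
  | case1 => rfl
  | case2 c => rfl
  | case3 a b rest h ih =>
      obtain ⟨ha, hb⟩ := h; subst ha; subst hb
      simp [pvSqueeze_cons, pvRep_head?, ih]
  | case4 a b rest h ih =>
      simp [pvSqueeze_cons, pvRep_head?, ih]

theorem pvSqueeze_of_not_infix (l : List Char) (h : ¬ ['_','_'] <:+: l) :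
    pvSqueeze l = l := by
  fun_induction pvSqueeze l with
  | case1 => rfl
  | case2 c => rfl
  | case3 a b rest hc ih => exact absurd ⟨[], rest, by simp [hc.1, hc.2]⟩ h
  | case4 a b rest hc ih =>
      rw [ih (fun hinf => h (hinf.trans (List.suffix_cons a (b :: rest)).isInfix))]

-- A's whole collapse loop computes exactly the one-pass canonical form
theorem pvCollapse_eq_squeeze (l : List Char) : pvCollapse l = pvSqueeze l := by
  fun_induction pvCollapse l with
  | case1 l h ih => rw [ih, pvSqueeze_rep]
  | case2 l h =>
      exact (pvSqueeze_of_not_infix l ((PySem.Chars.isIn_eq_false_iff _ _).mp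
        (Bool.not_eq_true _ ▸ h))).symm

-- B's single pass computes the same canonical form of the mapped text
theorem pvBuild_eq_squeeze (l : List Char) :
    pvBuild l false = pvSqueeze (l.map pvMapped) ∧
    '_' :: pvBuild l true = pvSqueeze ('_' :: l.map pvMapped) := by
  induction l with
  | nil => simp [pvBuild, pvSqueeze]
  | cons ch rest ih =>
    obtain ⟨ih1, ih2⟩ := ih
    by_cases hd : pvMapped ch = '_'
    · rw [pvSqueeze_cons] at ih2
      constructor
      · simp only [pvBuild, hd, List.map_cons]
        simp only [pvSqueeze_cons]
        simpa using ih2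
      · simp only [pvBuild, hd, List.map_cons]
        simp only [pvSqueeze_cons]
        simpa using ih2
    · constructor
      · simp only [pvBuild, List.map_cons]
        simp only [pvSqueeze_cons, hd]
        simp [ih1]
      · simp only [pvBuild, List.map_cons]
        simp only [pvSqueeze_cons, hd]
        simp [hd, ih1]

theorem pvFoldl_map (l acc : List Char) :
    l.foldl (fun acc ch => acc ++ [pvMapped ch]) acc = acc ++ l.map pvMapped := by
  induction l generalizing acc with
  | nil => simp
  | cons c rest ih => simp [List.foldl_cons, ih]

-- ===== VERDICT (by name: the statement is the Claim_ definition above) =====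
theorem safe_name_fragment_py_spec : Claim_equal_safe_name_fragment_py := by
  intro value _
  unfold Spec_safe_name_fragment_py safe_name_fragment_py safe_name_fragment_py_alt
  simp only [pvFoldl_map, List.nil_append, pvCollapse_eq_squeeze,
    (pvBuild_eq_squeeze _).1]
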